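-- pv_equiv track=rewrite | github.com/moonstachain/ai-da-guan-jia | scripts/ccswitch_openrouter_bridge.py | strip_codex_provider_section
-- ===== SOURCE A (Python) =====
-- def strip_codex_provider_section(raw: str) -> str:
--     lines = raw.splitlines()
--     kept: list[str] = []
--     skip_provider_block = False
--     for line in lines:
--         stripped = line.strip()
--         if stripped.startswith("[model_providers."):
--             skip_provider_block = True
--             continue
--         if skip_provider_block and stripped.startswith("[") and not stripped.startswith("[model_providers."):
--             skip_provider_block = False
--         if skip_provider_block:
--             continue
--         if stripped.startswith("model_provider ="):
--             continue
--         if stripped.startswith("model ="):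
--             continue
--         kept.append(line)
--     cleaned = "\n".join(kept).strip()
--     return cleaned + "\n" if cleaned else ""
-- ===== SOURCE B (Python) =====
-- def strip_codex_provider_section(raw: str) -> str:
--     # Group lines into blocks at section headers, then drop provider blocks
--     # and model/model_provider lines from the rest.
--     blocks = []
--     cur = []
--     for line in raw.splitlines():
--         if line.strip().startswith("["):
--             blocks.append(cur)
--             cur = [line]
--         else:
--             cur.append(line)
--     blocks.append(cur)
--     kept = []
--     for block in blocks:
--         if block and block[0].strip().startswith("[model_providers."):
--             continue
--         for line in block:
--             s = line.strip()
--             if s.startswith("model_provider =") or s.startswith("model ="):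
--                 continue
--             kept.append(line)
--     cleaned = "\n".join(kept).strip()
--     return cleaned + "\n" if cleaned else ""
-- ===== Notes on version B (the rewrite author's own statement) =====
-- stated objective: alternative
-- what changed: Replaces A's single pass with a skip_provider_block flag by a group-then-filter decomposition: lines are first grouped into blocks at section headers, then provider-headed blocks are dropped whole and model/model_provider lines filtered from the surviving blocks.
import Mathlib
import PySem

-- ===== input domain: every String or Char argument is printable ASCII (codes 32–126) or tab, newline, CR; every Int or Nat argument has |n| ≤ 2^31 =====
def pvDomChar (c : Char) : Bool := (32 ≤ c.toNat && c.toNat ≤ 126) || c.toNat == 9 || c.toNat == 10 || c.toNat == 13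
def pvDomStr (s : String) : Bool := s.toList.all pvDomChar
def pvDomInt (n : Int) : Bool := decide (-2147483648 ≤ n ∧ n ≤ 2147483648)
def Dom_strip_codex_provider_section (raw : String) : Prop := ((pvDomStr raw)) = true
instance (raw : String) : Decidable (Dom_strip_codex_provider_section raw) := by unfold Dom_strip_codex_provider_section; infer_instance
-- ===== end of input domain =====

-- B replaces A's single pass with a skip flag by a group-into-blocks-then-filter
-- decomposition (objective: alternative; same cost).

-- shared line tests (named helpers for `line.strip().startswith(...)`)
def isProv (l : String) : Bool := PySem.Str.startswith (PySem.Str.strip l) "[model_providers."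
def isHdr (l : String) : Bool := PySem.Str.startswith (PySem.Str.strip l) "["
def isModelProvLine (l : String) : Bool := PySem.Str.startswith (PySem.Str.strip l) "model_provider ="
def isModelLine (l : String) : Bool := PySem.Str.startswith (PySem.Str.strip l) "model ="

-- ===== PORT A =====
-- single pass with a skip_provider_block flag, as in A; loop body as a named step
def stepA (st : List String × Bool) (line : String) : List String × Bool :=
  let kept := st.1
  let skip_provider_block := st.2
  if isProv line then (kept, true)
  else
    let skip_provider_block :=
      if skip_provider_block && isHdr line && !isProv line then false
      else skip_provider_block
    if skip_provider_block then (kept, skip_provider_block)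
    else if isModelProvLine line then (kept, skip_provider_block)
    else if isModelLine line then (kept, skip_provider_block)
    else (kept ++ [line], skip_provider_block)

def strip_codex_provider_section (raw : String) : String :=
  let lines := PySem.Str.splitlines raw
  let r := lines.foldl stepA (([] : List String), false)
  let cleaned := PySem.Str.strip (PySem.Str.join "\n" r.1)
  if cleaned = "" then "" else cleaned ++ "\n"

-- ===== PORT B =====
-- group lines into blocks at section headers, then filter blocks and lines
def stepB (st : List (List String) × List String) (line : String) : List (List String) × List String :=
  if isHdr line then (st.1 ++ [st.2], [line])
  else (st.1, st.2 ++ [line])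

def provHead (b : List String) : Bool :=
  match b with | [] => false | l :: _ => isProv l

def keepLine (line : String) : Bool := !(isModelProvLine line || isModelLine line)

def strip_codex_provider_section_alt (raw : String) : String :=
  let lines := PySem.Str.splitlines raw
  let st := lines.foldl stepB (([] : List (List String)), ([] : List String))
  let blocks := st.1 ++ [st.2]
  let kept := (blocks.filter (fun b => !provHead b)).flatMap (fun b => b.filter keepLine)
  let cleaned := PySem.Str.strip (PySem.Str.join "\n" kept)
  if cleaned = "" then "" else cleaned ++ "\n"

-- ===== PRECONDITION & SPEC =====
def Spec_strip_codex_provider_section (raw : String) (out : String) : Prop := out = strip_codex_provider_section_alt raw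
instance (raw : String) (out : String) : Decidable (Spec_strip_codex_provider_section raw out) := by unfold Spec_strip_codex_provider_section; infer_instance

-- ===== CLAIM (what is proved, stated in full; the proofs are below) =====
def Claim_equal_strip_codex_provider_section : Prop := ∀ (raw : String), Dom_strip_codex_provider_section raw → Spec_strip_codex_provider_section raw (strip_codex_provider_section raw)

-- ===== LEMMAS AND PROOFS =====

lemma provHead_nil : provHead [] = false := rfl
lemma provHead_cons (l : String) (b : List String) : provHead (l :: b) = isProv l := rfl

lemma prov_hdr {l : String} (h : isProv l = true) : isHdr l = true := by
  simp only [isProv, isHdr, PySem.Str.startswith_eq] at *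
  rw [PySem.Chars.startswith_iff] at *
  exact List.IsPrefix.trans ⟨"model_providers.".toList, rfl⟩ h

lemma hdr_keep {l : String} (h : isHdr l = true) : keepLine l = true := by
  simp only [isHdr, keepLine, isModelProvLine, isModelLine, PySem.Str.startswith_eq] at *
  rw [PySem.Chars.startswith_iff] at h
  obtain ⟨t, ht⟩ := h
  have hl : (PySem.Str.strip l).toList = '[' :: t := by simpa using ht.symm
  have : ∀ (c : Char) (cs : List Char),
      PySem.Chars.startswith (PySem.Str.strip l).toList (c :: cs) = true → c = '[' := by
    intro c cs hc
    rw [PySem.Chars.startswith_iff, hl] at hc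
    exact (List.cons_prefix_cons.mp hc).1
  cases hm : PySem.Chars.startswith (PySem.Str.strip l).toList "model_provider =".toList with
  | true => exact absurd (this _ _ (by simpa using hm)) (by decide)
  | false =>
    cases hm2 : PySem.Chars.startswith (PySem.Str.strip l).toList "model =".toList with
    | true => exact absurd (this _ _ (by simpa using hm2)) (by decide)
    | false => simp [hm, hm2]

-- A's pass, as a direct recursion producing the kept lines
def fA : Bool → List String → List String
  | _, [] => []
  | skip, l :: ls =>
    if isProv l then fA true ls
    else
      let skip' := if skip && isHdr l then false else skip
      if skip' then fA skip' ls
      else if keepLine l then l :: fA skip' ls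
      else fA skip' ls

-- B's block machinery, as a direct recursion carrying the current block
def keptBlock (b : List String) : List String :=
  if provHead b then [] else b.filter keepLine

def gB : List String → List String → List String
  | cur, [] => keptBlock cur
  | cur, l :: ls => if isHdr l then keptBlock cur ++ gB [l] ls else gB (cur ++ [l]) ls

lemma stepA_eq (st : List String × Bool) (l : String) :
    stepA st l =
      if isProv l then (st.1, true)
      else
        let skip' := if st.2 && isHdr l then false else st.2
        if skip' then (st.1, skip')
        else if keepLine l then (st.1 ++ [l], skip')
        else (st.1, skip') := by
  unfold stepA keepLine
  cases hp : isProv l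
  · cases hh : isHdr l <;> cases hs : st.2 <;>
      cases hm1 : isModelProvLine l <;> cases hm2 : isModelLine l <;> simp [hp, hh, hs, hm1, hm2]
  · simp

lemma foldA_eq (ls : List String) : ∀ (kept : List String) (skip : Bool),
    (ls.foldl stepA (kept, skip)).1 = kept ++ fA skip ls := by
  induction ls with
  | nil => intro kept skip; simp [fA]
  | cons l ls ih =>
    intro kept skip
    rw [List.foldl_cons, stepA_eq]
    by_cases hp : isProv l
    · simp [hp, fA, ih]
    · simp only [Bool.not_eq_true] at hp
      cases hsk : skip <;> cases hh : isHdr l <;> cases hk : keepLine l <;>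
        simp [hp, hsk, hh, hk, fA, ih]

lemma foldB_eq (ls : List String) : ∀ (blocks : List (List String)) (cur : List String),
    (let st := ls.foldl stepB (blocks, cur)
     ((st.1 ++ [st.2]).filter (fun b => !provHead b)).flatMap (fun b => b.filter keepLine))
    = ((blocks.filter (fun b => !provHead b)).flatMap (fun b => b.filter keepLine))
      ++ gB cur ls := by
  induction ls with
  | nil =>
    intro blocks cur
    simp only [List.foldl_nil, gB, List.filter_append, List.flatMap_append, keptBlock]
    cases h : provHead cur <;> simp [h]
  | cons l ls ih =>
    intro blocks cur
    rw [List.foldl_cons]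
    cases hh : isHdr l
    · have h2 := ih blocks (cur ++ [l])
      simp only [List.filter_append, List.flatMap_append] at h2
      simpa [stepB, hh, gB] using h2
    · have h2 := ih (blocks ++ [cur]) [l]
      simp only [List.filter_append, List.flatMap_append] at h2
      simp only [stepB, hh, if_pos, gB, List.filter_append, List.flatMap_append]
      rw [h2]
      simp only [keptBlock]
      cases h : provHead cur <;> simp [h, List.append_assoc]

-- the core correspondence between the flag pass and the block pass
lemma gB_eq_fA (ls : List String) : ∀ (cur : List String),
    (provHead cur = false → gB cur ls = cur.filter keepLine ++ fA false ls) ∧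
    (provHead cur = true → gB cur ls = fA true ls) := by
  induction ls with
  | nil =>
    intro cur
    constructor <;> intro h <;> simp [gB, keptBlock, fA, h]
  | cons l ls ih =>
    intro cur
    by_cases hp : isProv l
    · have hh := prov_hdr hp
      constructor <;> intro h <;>
      · simp only [gB, hh, if_pos]
        rw [(ih [l]).2 (by simp [provHead_cons, hp])]
        simp [keptBlock, h, fA, hp]
    · by_cases hh : isHdr l
      · have hk := hdr_keep hh
        constructor <;> intro h <;>
        · simp only [gB, hh, if_pos]
          rw [(ih [l]).1 (by simp [provHead_cons, hp])]
          simp [keptBlock, h, fA, hp, hh, hk]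
      · simp only [Bool.not_eq_true] at hh
        constructor <;> intro h
        · simp only [gB, hh, Bool.false_eq_true, if_neg, not_false_iff]
          have hph : provHead (cur ++ [l]) = false := by
            cases cur with
            | nil => simpa [provHead_cons] using hp
            | cons c cs => simpa [provHead_cons] using h
          rw [(ih (cur ++ [l])).1 hph]
          cases hk : keepLine l <;>
            simp [fA, hp, hh, hk, List.filter_append, List.append_assoc]
        · simp only [gB, hh, Bool.false_eq_true, if_neg, not_false_iff]
          have hcur : cur ≠ [] := by intro hc; simp [hc, provHead_nil] at h
          have hph : provHead (cur ++ [l]) = true := by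
            cases cur with
            | nil => exact absurd rfl hcur
            | cons c cs => simpa [provHead_cons] using h
          rw [(ih (cur ++ [l])).2 hph]
          simp [fA, hp, hh]

lemma kept_eq (ls : List String) :
    (ls.foldl stepA (([] : List String), false)).1
    = (let st := ls.foldl stepB (([] : List (List String)), ([] : List String))
       ((st.1 ++ [st.2]).filter (fun b => !provHead b)).flatMap (fun b => b.filter keepLine)) := by
  rw [foldA_eq, foldB_eq]
  rw [(gB_eq_fA ls []).1 (by simp [provHead_nil])]
  simp

-- ===== VERDICT (by name: the statement is the Claim_ definition above) =====
theorem strip_codex_provider_section_spec : Claim_equal_strip_codex_provider_section := by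
  intro raw _
  unfold Spec_strip_codex_provider_section strip_codex_provider_section strip_codex_provider_section_alt
  exact congrArg (fun k =>
    let cleaned := PySem.Str.strip (PySem.Str.join "\n" k)
    if cleaned = "" then "" else cleaned ++ "\n") (kept_eq (PySem.Str.splitlines raw))
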